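-- pv_equiv track=rewrite | github.com/benms/ua-alerts-map | server/download_enhanced_alerts.py | _determine_alert_level
-- ===== SOURCE A (Python) =====
-- from typing import Dict, List, Optional, Tuple, Any
-- from enum import Enum
--
-- class AlertLevel(Enum):
--     NONE = "none"
--     LOW = "low"
--     MEDIUM = "medium"
--     HIGH = "high"
--     CRITICAL = "critical"
--
-- def _determine_alert_level(threat_types: List[str]) -> str:
--     """Determine alert level based on threat types"""
--     if not threat_types:
--         return AlertLevel.NONE.value
--
--     critical_threats = ["nuclear", "ballistic_missiles"]
--     high_threats = ["air_raid", "cruise_missiles", "chemical"]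
--     medium_threats = ["tactical_aviation", "artillery"]
--
--     for threat in threat_types:
--         if threat in critical_threats:
--             return AlertLevel.CRITICAL.value
--
--     for threat in threat_types:
--         if threat in high_threats:
--             return AlertLevel.HIGH.value
--
--     for threat in threat_types:
--         if threat in medium_threats:
--             return AlertLevel.MEDIUM.value
--
--     return AlertLevel.LOW.value
-- ===== SOURCE B (Python) =====
-- _PRIORITY = {
--     "nuclear": 4, "ballistic_missiles": 4,
--     "air_raid": 3, "cruise_missiles": 3, "chemical": 3,
--     "tactical_aviation": 2, "artillery": 2,
-- }
-- _LEVEL = {4: "critical", 3: "high", 2: "medium", 1: "low"}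
--
-- def _determine_alert_level(threat_types):
--     if not threat_types:
--         return "none"
--     best = 1
--     for t in threat_types:
--         p = _PRIORITY.get(t, 1)
--         if p > best:
--             best = p
--     return _LEVEL[best]
-- ===== Notes on version B (the rewrite author's own statement) =====
-- stated objective: simpler
-- what changed: Replaced A's three sequential membership scans over hard-coded category lists by one pass keeping the maximum numeric priority from a threat->priority dict, translated to the level string at the end.
import Mathlib
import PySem

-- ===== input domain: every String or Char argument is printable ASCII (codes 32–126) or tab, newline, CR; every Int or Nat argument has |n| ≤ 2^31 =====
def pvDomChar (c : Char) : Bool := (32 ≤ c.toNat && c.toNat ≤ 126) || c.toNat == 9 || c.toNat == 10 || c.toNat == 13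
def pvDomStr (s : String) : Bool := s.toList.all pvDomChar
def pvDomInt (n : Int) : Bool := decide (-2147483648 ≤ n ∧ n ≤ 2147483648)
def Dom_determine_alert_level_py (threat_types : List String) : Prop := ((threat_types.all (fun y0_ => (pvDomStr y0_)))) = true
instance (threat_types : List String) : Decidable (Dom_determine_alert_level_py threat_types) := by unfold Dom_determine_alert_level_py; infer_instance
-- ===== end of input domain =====

-- B replaces A's three sequential category scans by a single max-priority fold over a threat->priority table (objective: simpler).
-- ===== PORT A =====
-- "for threat in threat_types: if threat in critical_threats: return ..." — early-return scan
def pvScanA (cat : List String) : List String → Bool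
  | [] => false
  | t :: ts => if t ∈ cat then true else pvScanA cat ts

def determine_alert_level_py (threat_types : List String) : String :=
  if threat_types = [] then "none"
  else
    let critical_threats := ["nuclear", "ballistic_missiles"]
    let high_threats := ["air_raid", "cruise_missiles", "chemical"]
    let medium_threats := ["tactical_aviation", "artillery"]
    if pvScanA critical_threats threat_types then "critical"
    else if pvScanA high_threats threat_types then "high"
    else if pvScanA medium_threats threat_types then "medium"
    else "low"

-- ===== PORT B =====
def pvPriorityDict : PySem.Dict String Int :=
  PySem.Dict.ofList [("nuclear", 4), ("ballistic_missiles", 4),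
    ("air_raid", 3), ("cruise_missiles", 3), ("chemical", 3),
    ("tactical_aviation", 2), ("artillery", 2)]

def pvLevelDict : PySem.Dict Int String :=
  PySem.Dict.ofList [(4, "critical"), (3, "high"), (2, "medium"), (1, "low")]

def determine_alert_level_py_alt (threat_types : List String) : String :=
  if threat_types = [] then "none"
  else
    let best := threat_types.foldl
      (fun best t => let p := pvPriorityDict.getD t 1; if p > best then p else best) 1
    pvLevelDict.getD best ""

-- ===== PRECONDITION & SPEC =====
def Spec_determine_alert_level_py (threat_types : List String) (out : String) : Prop := out = determine_alert_level_py_alt threat_types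
instance (threat_types : List String) (out : String) : Decidable (Spec_determine_alert_level_py threat_types out) := by unfold Spec_determine_alert_level_py; infer_instance

-- ===== CLAIM (what is proved, stated in full; the proofs are below) =====
def Claim_equal_determine_alert_level_py : Prop := ∀ (threat_types : List String), Dom_determine_alert_level_py threat_types → Spec_determine_alert_level_py threat_types (determine_alert_level_py threat_types)

-- ===== LEMMAS AND PROOFS =====

-- One fold step is "max of accumulator and the threat's priority".
theorem pvStep_eq_max (b p : Int) : (if p > b then p else b) = max b p := by
  simp [max_def]; omega

-- The priority table agrees with membership in A's three category lists.
theorem pvPrio_char (t : String) :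
    pvPriorityDict.getD t 1 =
      if t ∈ ["nuclear", "ballistic_missiles"] then 4
      else if t ∈ ["air_raid", "cruise_missiles", "chemical"] then 3
      else if t ∈ ["tactical_aviation", "artillery"] then 2
      else 1 := by
  have h : pvPriorityDict = PySem.Dict.mk [("nuclear", 4), ("ballistic_missiles", 4),
      ("air_raid", 3), ("cruise_missiles", 3), ("chemical", 3),
      ("tactical_aviation", 2), ("artillery", 2)] := by rfl
  rcases eq_or_ne t "nuclear" with h1 | h1; · subst h1; decide
  rcases eq_or_ne t "ballistic_missiles" with h2 | h2; · subst h2; decide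
  rcases eq_or_ne t "air_raid" with h3 | h3; · subst h3; decide
  rcases eq_or_ne t "cruise_missiles" with h4 | h4; · subst h4; decide
  rcases eq_or_ne t "chemical" with h5 | h5; · subst h5; decide
  rcases eq_or_ne t "tactical_aviation" with h6 | h6; · subst h6; decide
  rcases eq_or_ne t "artillery" with h7 | h7; · subst h7; decide
  simp only [h, PySem.Dict.getD, PySem.Dict.get?_mk_cons, beq_iff_eq,
    if_neg (Ne.symm h1), if_neg (Ne.symm h2), if_neg (Ne.symm h3), if_neg (Ne.symm h4),
    if_neg (Ne.symm h5), if_neg (Ne.symm h6), if_neg (Ne.symm h7)]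
  simp [PySem.Dict.get?, h1, h2, h3, h4, h5, h6, h7]

-- Characterisation of B's fold in terms of A's three scans.
theorem pvFold_char (l : List String) (b : Int) (hb : 1 ≤ b) :
    l.foldl (fun best t => let p := pvPriorityDict.getD t 1; if p > best then p else best) b =
      if pvScanA ["nuclear", "ballistic_missiles"] l then max b 4
      else if pvScanA ["air_raid", "cruise_missiles", "chemical"] l then max b 3
      else if pvScanA ["tactical_aviation", "artillery"] l then max b 2
      else b := by
  induction l generalizing b with
  | nil => simp [pvScanA]
  | cons t ts ih =>
    rw [List.foldl_cons, ih _ (by simp only [pvStep_eq_max]; omega)]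
    simp only [pvStep_eq_max, pvPrio_char t, pvScanA]
    split_ifs <;> simp_all

-- ===== VERDICT (by name: the statement is the Claim_ definition above) =====
theorem determine_alert_level_py_spec : Claim_equal_determine_alert_level_py := by
  intro l _
  unfold Spec_determine_alert_level_py determine_alert_level_py determine_alert_level_py_alt
  by_cases h : l = []
  · simp [h]
  · simp only [h, if_false]
    rw [pvFold_char l 1 (by omega)]
    split_ifs <;> decide
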